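-- pv_equiv track=rewrite | github.com/Ivanko4456/qrproj | main.py | remove_mask
-- ===== SOURCE A (Python) =====
-- def remove_mask(line):
-- 	newline = ''
-- 	flag = True
-- 	for letter in line:
-- 		if flag:
-- 			newline += f'{1 - int(letter)}'
-- 			flag = False
-- 		else:
-- 			newline += letter
-- 			flag = True
-- 	return newline
-- ===== SOURCE B (Python) =====
-- def remove_mask(line):
--     evens = [str(1 - int(c)) for c in line[::2]]
--     odds = list(line[1:][::2])
--     parts = [x for p in zip(evens, odds) for x in p]
--     if len(odds) < len(evens):
--         parts.append(evens[-1])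
--     return ''.join(parts)
-- ===== Notes on version B (the rewrite author's own statement) =====
-- stated objective: alternative
-- what changed: Replaces A's single flag-toggling character loop with a positional slice split (line[::2] flipped, line[1:][::2] kept) interleaved back via zip plus a trailing even, joined once.
import Mathlib
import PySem

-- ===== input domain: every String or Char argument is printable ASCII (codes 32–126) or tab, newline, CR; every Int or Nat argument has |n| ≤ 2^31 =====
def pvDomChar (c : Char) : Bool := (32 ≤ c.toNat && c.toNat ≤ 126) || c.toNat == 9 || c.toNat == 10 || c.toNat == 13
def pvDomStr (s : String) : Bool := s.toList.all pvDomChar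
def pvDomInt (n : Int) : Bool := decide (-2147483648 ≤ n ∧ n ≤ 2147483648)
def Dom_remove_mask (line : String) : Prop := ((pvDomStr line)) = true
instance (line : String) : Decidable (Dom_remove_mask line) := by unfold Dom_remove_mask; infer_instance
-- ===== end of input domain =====

-- B replaces A's flag-toggling single pass by a slice split (line[::2] flipped, line[1:][::2] kept)
-- interleaved back together; objective: alternative decomposition, same cost.


-- ===== PORT A =====
-- f'{1 - int(letter)}' as a char list; int(letter) raises ValueError on a non-digit
-- (PySem.Int.ofChars? = none there) — those inputs are excluded by Pre_, the getD 0 is never reached inside it.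
def pvFlipA (c : Char) : List Char :=
  PySem.Int.toChars (1 - ((PySem.Int.ofChars? [c]).getD 0))

-- one iteration of A's for-loop: state = (newline as chars, flag)
def pvStepA (st : List Char × Bool) (letter : Char) : List Char × Bool :=
  if st.2 then (st.1 ++ pvFlipA letter, false) else (st.1 ++ [letter], true)

def remove_mask (line : String) : String :=
  String.ofList (line.toList.foldl pvStepA ([], true)).1

-- ===== PORT B =====
def pvFlipB (c : Char) : List Char :=
  PySem.Int.toChars (1 - ((PySem.Int.ofChars? [c]).getD 0))

-- Source B: evens = [str(1-int(c)) for c in line[::2]]; odds = list(line[1:][::2]);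
-- parts = [x for p in zip(evens, odds) for x in p]; trailing even if evens longer; ''.join(parts).
-- ''.join over char-list parts is String.ofList of their flatten (exact: plain concatenation).
def remove_mask_alt (line : String) : String :=
  let cs := line.toList
  let evens := ((PySem.List.slice? cs none none 2).getD []).map pvFlipB
  let odds := (PySem.List.slice? (PySem.List.slice cs (some 1) none) none none 2).getD []
  let parts := (evens.zip odds).flatMap (fun p => [p.1, [p.2]])
  let parts := if odds.length < evens.length then parts ++ [evens.getLastD []] else parts
  String.ofList parts.flatten

-- ===== PRECONDITION & SPEC =====
-- Pre_ excludes exactly the inputs where Python A raises ValueError: int(letter) on a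
-- non-digit character at an even index (flag = True there).
def Pre_remove_mask (line : String) : Prop :=
  ∀ i, i < line.toList.length → i % 2 = 0 → (line.toList.getD i ' ').isDigit = true
instance (line : String) : Decidable (Pre_remove_mask line) := by
  unfold Pre_remove_mask; infer_instance

def pvWitness_remove_mask : String := "0110"

def Spec_remove_mask (line : String) (out : String) : Prop := out = remove_mask_alt line
instance (line : String) (out : String) : Decidable (Spec_remove_mask line out) := by
  unfold Spec_remove_mask; infer_instance

-- ===== CLAIM (what is proved, stated in full; the proofs are below) =====
def Claim_equal_remove_mask : Prop :=
  ∀ (line : String), Dom_remove_mask line → Pre_remove_mask line →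
    Spec_remove_mask line (remove_mask line)

-- ===== LEMMAS AND PROOFS =====

-- the even-index elements of a list (what xs[::2] selects)
def pvEvens : List Char → List Char
  | [] => []
  | [c] => [c]
  | a :: _ :: r => a :: pvEvens r

lemma pvSliceIdx (n : Nat) :
    PySem.List.sliceIndices n none none 2 = ((0:Int), (n:Int), (2:Int)) := by
  simp [PySem.List.sliceIndices]

lemma pvFM : ∀ (xs : List Char),
    List.filterMap (fun (k : Nat) => xs[((2:Int)*(k:Int)).toNat]?)
      (List.range ((xs.length+1)/2)) = pvEvens xs := by
  intro xs
  induction xs using pvEvens.induct with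
  | case1 => simp [pvEvens]
  | case2 c => simp [pvEvens]
  | case3 a b r ih =>
      have hlen : ((a :: b :: r).length + 1) / 2 = (r.length + 1)/2 + 1 := by
        simp [List.length_cons]; omega
      rw [hlen, List.range_succ_eq_map, List.filterMap_cons, List.filterMap_map]
      have h0 : ((2:Int)*((0:Nat):Int)).toNat = 0 := by norm_num
      simp only [pvEvens, h0, List.getElem?_cons_zero, List.cons.injEq, true_and]
      rw [← ih]
      apply List.filterMap_congr
      intro k _
      have h2 : ((2:Int)*((k:Int)+1)).toNat = (2*k)+1+1 := by omega
      have h3 : ((2:Int)*(k:Int)).toNat = 2*k := by omega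
      simp only [Function.comp, Nat.succ_eq_add_one]
      push_cast
      rw [h2]
      simp only [List.getElem?_cons_succ]
      rw [h3]

lemma pvSlice2 (xs : List Char) :
    PySem.List.slice? xs none none 2 = some (pvEvens xs) := by
  have h := pvFM xs
  simp only [PySem.List.slice?, pvSliceIdx]
  have hc : (if (0:Int) < (xs.length:Int)
      then ((((xs.length:Int)) - 0 + 2 - 1)/2).toNat else 0) = (xs.length+1)/2 := by
    split_ifs with hx
    · omega
    · omega
  norm_num at hc ⊢
  rw [hc]
  exact h

-- B's parts list, expressed over pvEvens
def pvParts (cs : List Char) : List (List Char) :=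
  let evens := (pvEvens cs).map pvFlipB
  let odds := pvEvens cs.tail
  let parts := (evens.zip odds).flatMap (fun p => [p.1, [p.2]])
  if odds.length < evens.length then parts ++ [evens.getLastD []] else parts

lemma pvAltEq (line : String) :
    remove_mask_alt line = String.ofList (pvParts line.toList).flatten := by
  simp only [remove_mask_alt, pvParts, pvSlice2, PySem.List.slice_from_one,
    Option.getD_some]

lemma pvEvens_tail_cons (b : Char) (r : List Char) :
    pvEvens (b :: r) = b :: pvEvens r.tail := by
  cases r <;> simp [pvEvens]

lemma pvParts_cons₂ (a b : Char) (r : List Char) :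
    pvParts (a :: b :: r) = pvFlipB a :: [b] :: pvParts r := by
  simp only [pvParts, pvEvens, List.tail_cons, pvEvens_tail_cons b r,
    List.map_cons, List.zip_cons_cons, List.flatMap_cons, List.length_cons]
  have hcond : ((pvEvens r.tail).length + 1 < (List.map pvFlipB (pvEvens r)).length + 1)
      ↔ ((pvEvens r.tail).length < (List.map pvFlipB (pvEvens r)).length) := by omega
  by_cases h : (pvEvens r.tail).length < (List.map pvFlipB (pvEvens r)).length
  · have hne : List.map pvFlipB (pvEvens r) ≠ [] := by
      intro hnil; rw [hnil] at h; simp at h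
    rw [if_pos (hcond.mpr h), if_pos h]
    obtain ⟨x, xs, hx⟩ := List.exists_cons_of_ne_nil hne
    simp [hx]
  · rw [if_neg (fun hh => h (hcond.mp hh)), if_neg h]
    simp

lemma pvMain : ∀ (cs : List Char) (acc : List Char),
    (List.foldl pvStepA (acc, true) cs).1 = acc ++ (pvParts cs).flatten := by
  intro cs
  induction cs using pvEvens.induct with
  | case1 => intro acc; simp [pvParts, pvEvens]
  | case2 c =>
      intro acc
      simp [pvParts, pvEvens, pvStepA, pvFlipA, pvFlipB]
  | case3 a b r ih =>
      intro acc
      have hstep : List.foldl pvStepA (acc, true) (a :: b :: r)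
          = List.foldl pvStepA (acc ++ pvFlipA a ++ [b], true) r := by
        simp [pvStepA]
      rw [hstep, ih, pvParts_cons₂]
      simp [pvFlipA, pvFlipB]

-- ===== VERDICT (by name: the statement is the Claim_ definition above) =====
theorem remove_mask_spec : Claim_equal_remove_mask := by
  intro line _ _
  unfold Spec_remove_mask
  rw [pvAltEq, remove_mask, pvMain line.toList []]
  simp
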